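-- pv_equiv track=rewrite | github.com/pypi-data/pypi-mirror-402 | packages/vista-trading/vista_trading-0.1.1-py3-none-any.whl/src/llm_service.py | _count_consecutive_candles
-- ===== SOURCE A (Python) =====
-- def _count_consecutive_candles(candles: list) -> dict:
--     """Count consecutive green/red candles from the end."""
--     if not candles:
--         return {"green": 0, "red": 0}
--
--     green_count = 0
--     red_count = 0
--
--     # Count from end
--     for c in reversed(candles[-10:]):
--         is_bullish = c.get("close", 0) > c.get("open", 0)
--         if is_bullish:
--             if red_count > 0:
--                 break
--             green_count += 1
--         else:
--             if green_count > 0: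
--                 break
--             red_count += 1
--
--     return {"green": green_count, "red": red_count}
-- ===== SOURCE B (Python) =====
-- def _count_consecutive_candles(candles: list) -> dict:
--     """Count consecutive green/red candles from the end."""
--     if not candles:
--         return {"green": 0, "red": 0}
--     # Forward single pass over the last-10 window, maintaining the current
--     # run length, which resets to 1 on each colour change; the run left at
--     # the end is the trailing run of the window.
--     run = 0
--     last = False
--     for c in candles[-10:]:
--         bull = c.get("close", 0) > c.get("open", 0)
--         run = run + 1 if (run and bull == last) else 1
--         last = bull
--     if last:
--         return {"green": run, "red": 0}
--     return {"green": 0, "red": run}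
-- ===== Notes on version B (the rewrite author's own statement) =====
-- stated objective: alternative
-- what changed: Replaces the backward early-breaking scan with two counters by a forward single pass over the last-10 window that maintains one run counter resetting on every colour change, so the run remaining at the end is exactly the trailing run A counts.
import Mathlib
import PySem

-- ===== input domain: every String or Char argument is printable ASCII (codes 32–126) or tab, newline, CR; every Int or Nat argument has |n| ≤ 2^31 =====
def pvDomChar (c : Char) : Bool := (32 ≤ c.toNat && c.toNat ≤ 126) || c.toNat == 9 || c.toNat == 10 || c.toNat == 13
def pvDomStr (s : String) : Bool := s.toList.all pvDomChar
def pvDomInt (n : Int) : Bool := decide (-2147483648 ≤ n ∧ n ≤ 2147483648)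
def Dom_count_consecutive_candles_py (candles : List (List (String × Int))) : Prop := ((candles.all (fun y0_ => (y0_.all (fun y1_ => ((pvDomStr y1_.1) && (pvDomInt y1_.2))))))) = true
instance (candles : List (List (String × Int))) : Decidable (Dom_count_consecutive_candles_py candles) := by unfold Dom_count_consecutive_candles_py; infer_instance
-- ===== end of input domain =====

-- B replaces A's backward early-breaking two-counter scan with a forward single
-- pass maintaining one run counter that resets on colour change (objective: alternative, same cost).

-- ===== PORT A =====
-- shared helper: Python's c.get(key, 0) on a dict (assoc list, first match)
def pvGet0 (c : List (String × Int)) (k : String) : Int :=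
  (PySem.Dict.mk c).getD k 0

-- the for-loop of A with its two counters and the two 'break's
def pvALoop : List (List (String × Int)) → Int → Int → Int × Int
  | [], g, r => (g, r)
  | c :: cs, g, r =>
    let isBullish := pvGet0 c "close" > pvGet0 c "open"
    if isBullish then
      if r > 0 then (g, r) else pvALoop cs (g + 1) r
    else
      if g > 0 then (g, r) else pvALoop cs g (r + 1)

def count_consecutive_candles_py (candles : List (List (String × Int))) : List (String × Int) :=
  if candles.isEmpty then [("green", 0), ("red", 0)]
  else
    let p := pvALoop ((PySem.List.slice candles (some (-10)) none).reverse) 0 0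
    [("green", p.1), ("red", p.2)]

-- ===== PORT B =====
def pvBull (c : List (String × Int)) : Bool :=
  decide (pvGet0 c "close" > pvGet0 c "open")

-- one forward step of B's loop: state (run, last)
def pvBStep (s : Int × Bool) (c : List (String × Int)) : Int × Bool :=
  let bull := pvBull c
  (if s.1 ≠ 0 ∧ bull = s.2 then s.1 + 1 else 1, bull)

def count_consecutive_candles_py_alt (candles : List (List (String × Int))) : List (String × Int) :=
  if candles.isEmpty then [("green", 0), ("red", 0)]
  else
    let s := (PySem.List.slice candles (some (-10)) none).foldl pvBStep (0, false)
    if s.2 then [("green", s.1), ("red", 0)] else [("green", 0), ("red", s.1)]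

-- ===== PRECONDITION & SPEC =====
def Spec_count_consecutive_candles_py (candles : List (List (String × Int))) (out : List (String × Int)) : Prop := out = count_consecutive_candles_py_alt candles
instance (candles : List (List (String × Int))) (out : List (String × Int)) : Decidable (Spec_count_consecutive_candles_py candles out) := by unfold Spec_count_consecutive_candles_py; infer_instance

-- ===== CLAIM (what is proved, stated in full; the proofs are below) =====
def Claim_equal_count_consecutive_candles_py : Prop := ∀ (candles : List (List (String × Int))), Dom_count_consecutive_candles_py candles → Spec_count_consecutive_candles_py candles (count_consecutive_candles_py candles)

-- ===== LEMMAS AND PROOFS =====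
-- A's loop when the reversed window starts green: green = 1 + leading bullish run
theorem pvALoop_true (cs : List (List (String × Int))) :
    ∀ g : Int, 0 < g → pvALoop cs g 0 = (g + (cs.takeWhile pvBull).length, 0) := by
  induction cs with
  | nil => intro g hg; simp [pvALoop]
  | cons c cs ih =>
    intro g hg
    by_cases hb : pvBull c
    · have hb' : pvGet0 c "close" > pvGet0 c "open" := by simpa [pvBull] using hb
      rw [show pvALoop (c :: cs) g 0 = pvALoop cs (g + 1) 0 by simp [pvALoop, hb']]
      rw [ih (g + 1) (by omega)]
      simp [hb]
      omega
    · have hb' : ¬ (pvGet0 c "close" > pvGet0 c "open") := by simpa [pvBull] using hb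
      simp [pvALoop, hb', hg, hb]

-- A's loop when the reversed window starts red: red = 1 + leading bearish run
theorem pvALoop_false (cs : List (List (String × Int))) :
    ∀ r : Int, 0 < r → pvALoop cs 0 r = (0, r + (cs.takeWhile (fun c => !pvBull c)).length) := by
  induction cs with
  | nil => intro r hr; simp [pvALoop]
  | cons c cs ih =>
    intro r hr
    by_cases hb : pvBull c
    · have hb' : pvGet0 c "close" > pvGet0 c "open" := by simpa [pvBull] using hb
      simp [pvALoop, hb', hr, hb]
    · have hb' : ¬ (pvGet0 c "close" > pvGet0 c "open") := by simpa [pvBull] using hb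
      rw [show pvALoop (c :: cs) 0 r = pvALoop cs 0 (r + 1) by simp [pvALoop, hb']]
      rw [ih (r + 1) (by omega)]
      simp [hb]
      omega

-- B's forward fold over l ++ [c] ends with run = 1 + trailing run of l matching c's colour
theorem pvBFold (l : List (List (String × Int))) :
    ∀ c : List (String × Int),
    (l ++ [c]).foldl pvBStep (0, false)
      = (((l.reverse.takeWhile (fun x => pvBull x = pvBull c)).length : Int) + 1, pvBull c) := by
  induction l using List.reverseRecOn with
  | nil => intro c; simp [pvBStep]
  | append_singleton ys d ih =>
    intro c
    rw [List.foldl_append, List.foldl_cons, List.foldl_nil, ih d]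
    by_cases h : pvBull c = pvBull d
    · simp only [pvBStep]
      rw [if_pos ⟨by positivity, h⟩]
      simp [h]
    · simp only [pvBStep]
      rw [if_neg (by tauto)]
      have h' : ¬ (pvBull d = pvBull c) := fun e => h e.symm
      simp [h']

theorem pv_slice_ne_nil (candles : List (List (String × Int))) (h : candles ≠ []) :
    (PySem.List.slice candles (some (-10)) none) ≠ [] := by
  rw [PySem.List.slice_from_neg_ofNat candles 10 (by omega)]
  simp only [ne_eq, List.drop_eq_nil_iff]
  have : 0 < candles.length := List.length_pos_of_ne_nil h
  omega

-- ===== VERDICT (by name: the statement is the Claim_ definition above) =====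
theorem count_consecutive_candles_py_spec : Claim_equal_count_consecutive_candles_py := by
  intro candles _
  unfold Spec_count_consecutive_candles_py count_consecutive_candles_py count_consecutive_candles_py_alt
  by_cases hz : candles = []
  · subst hz; simp
  · have hne := pv_slice_ne_nil candles hz
    simp only [List.isEmpty_iff, hz, if_false]
    set w := PySem.List.slice candles (some (-10)) none with hw
    obtain ⟨l, c, hrs⟩ : ∃ l x, w = l ++ [x] := by
      rcases List.exists_cons_of_ne_nil (List.reverse_ne_nil_iff.mpr hne) with ⟨x, xs, hx⟩
      exact ⟨xs.reverse, x, by rw [← List.reverse_reverse w, hx]; simp⟩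
    rw [hrs, pvBFold]
    rw [show (l ++ [c]).reverse = c :: l.reverse by simp]
    by_cases hb : pvBull c
    · have hb' : pvGet0 c "close" > pvGet0 c "open" := by simpa [pvBull] using hb
      rw [show pvALoop (c :: l.reverse) 0 0 = pvALoop l.reverse 1 0 by simp [pvALoop, hb']]
      rw [pvALoop_true l.reverse 1 (by omega)]
      simp only [hb, if_pos]
      have hconv : (l.reverse.takeWhile (fun x => decide (pvBull x = true)))
          = l.reverse.takeWhile pvBull := by
        congr 1; funext x; cases pvBull x <;> simp
      rw [hconv]
      simp
      omega
    · have hb' : ¬ (pvGet0 c "close" > pvGet0 c "open") := by simpa [pvBull] using hb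
      rw [show pvALoop (c :: l.reverse) 0 0 = pvALoop l.reverse 0 1 by simp [pvALoop, hb']]
      rw [pvALoop_false l.reverse 1 (by omega)]
      simp only [Bool.not_eq_true] at hb
      have hconv : (l.reverse.takeWhile (fun x => decide (pvBull x = false)))
          = l.reverse.takeWhile (fun c => !pvBull c) := by
        congr 1; funext x; cases pvBull x <;> simp
      rw [hb, hconv]
      simp
      omega
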